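-- pv_equiv track=rewrite | github.com/joshanashakya/dissertation | workspace/dataset/java-python/GeeksForGeeks/318/A/2.py | StrictlyPositiveXor
-- ===== SOURCE A (Python) =====
-- def StrictlyPositiveXor(A, N) :
--
--     # To store the XOR
--     # of all the elements
--     allxor = 0;
--
--     # To check if all the
--     # elements of the array are 0s
--     checkallzero = True;
--
--     for i in range(N) :
--
--         # Take XOR of all the elements
--         allxor ^= A[i];
--
--         # If any positive value is found
--         # the make the checkallzero false
--         if (A[i] > 0) :
--             checkallzero = False;
--
--     # If complete array is the answer
--     if (allxor != 0) :
--         return N;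
--
--     # If all elements are equal to zero
--     if (checkallzero) :
--         return -1;
--
--     # Initialize l and r
--     l = N; r = -1;
--
--     for i in range(N) :
--
--         # First positive value of the array
--         if (A[i] > 0) :
--             l = i + 1;
--             break;
--
--     for i in range(N - 1, -1, -1) :
--
--         # Last positive value of the array
--         if (A[i] > 0) :
--             r = i + 1;
--             break;
--
--     # Maximum length among
--     # these two subarrays
--     return max(N - l, r - 1);
-- ===== SOURCE B (Python) =====
-- def StrictlyPositiveXor(A, N):
--     # Running-maximum over candidates: each positive position i contributes
--     # the candidate max(i, N - i - 1); best starts at -1 (covers the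
--     # no-positive case).  Correct because i is increasing and N-i-1 is
--     # decreasing over positions, so the running max over all positive
--     # positions equals max(last, N - first - 1).
--     total = 0
--     best = -1
--     for i in range(N):
--         total ^= A[i]
--         if A[i] > 0:
--             c = i if i >= N - i - 1 else N - i - 1
--             if c > best:
--                 best = c
--     return N if total != 0 else best
-- ===== Notes on version B (the rewrite author's own statement) =====
-- stated objective: alternative
-- what changed: A's four loops (xor pass with an all-zero flag plus forward and backward break-scans for the first/last positive index and the formula max(N-l, r-1)) are replaced by a running maximum over candidates: each positive position i contributes max(i, N-i-1), with best initialised to -1; no first/last indices, break scans or all-zero flag are kept.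
import Mathlib
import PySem

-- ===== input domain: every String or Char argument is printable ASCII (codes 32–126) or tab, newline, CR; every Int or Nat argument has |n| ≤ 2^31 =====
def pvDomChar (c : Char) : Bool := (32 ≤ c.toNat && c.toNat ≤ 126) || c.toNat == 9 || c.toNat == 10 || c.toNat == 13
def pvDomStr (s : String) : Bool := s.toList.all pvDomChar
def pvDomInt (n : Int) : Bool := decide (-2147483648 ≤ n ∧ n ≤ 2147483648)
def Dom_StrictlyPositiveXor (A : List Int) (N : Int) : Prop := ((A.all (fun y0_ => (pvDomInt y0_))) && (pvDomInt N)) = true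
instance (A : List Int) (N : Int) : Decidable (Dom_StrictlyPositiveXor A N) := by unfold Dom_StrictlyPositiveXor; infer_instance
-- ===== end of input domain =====

-- B replaces A's four loops (xor pass + all-zero flag + two break-scans and the
-- max(N-l, r-1) formula) by one pass keeping a running maximum of the candidate
-- max(i, N-i-1) over positive positions; same outputs on Pre_ (no speed claim).

-- ===== PORT A =====
-- first loop: accumulate (allxor, checkallzero)
def pxLoop1 (A : List Int) (s : Int × Bool) (i : Int) : Int × Bool :=
  let a := PySem.List.pyGetD A i 0
  (Int.xor s.1 a, if a > 0 then false else s.2)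

-- a scan-with-break: first index i in the given order with A[i] > 0 yields i+1, else the default
def pxScan (A : List Int) (idxs : List Int) (dflt : Int) : Int :=
  match idxs with
  | [] => dflt
  | i :: rest => if PySem.List.pyGetD A i 0 > 0 then i + 1 else pxScan A rest dflt

def StrictlyPositiveXor (A : List Int) (N : Int) : Int :=
  if ((PySem.List.pyRange 0 N 1).foldl (pxLoop1 A) (0, true)).1 ≠ 0 then N
  else if ((PySem.List.pyRange 0 N 1).foldl (pxLoop1 A) (0, true)).2 then -1
  else
    max (N - pxScan A (PySem.List.pyRange 0 N 1) N)
        (pxScan A (PySem.List.pyRange (N - 1) (-1) (-1)) (-1) - 1)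

-- ===== PORT B =====
-- single pass: (total xor, best candidate so far)
def pxStepB (A : List Int) (N : Int) (s : Int × Int) (i : Int) : Int × Int :=
  let a := PySem.List.pyGetD A i 0
  let t := Int.xor s.1 a
  if a > 0 then
    let c := if i ≥ N - i - 1 then i else N - i - 1
    (t, if c > s.2 then c else s.2)
  else (t, s.2)

def StrictlyPositiveXor_alt (A : List Int) (N : Int) : Int :=
  if ((PySem.List.pyRange 0 N 1).foldl (pxStepB A N) (0, -1)).1 ≠ 0 then N
  else ((PySem.List.pyRange 0 N 1).foldl (pxStepB A N) (0, -1)).2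

-- ===== PRECONDITION & SPEC =====
-- Pre_: A raises IndexError when N exceeds the list length
def Pre_StrictlyPositiveXor (A : List Int) (N : Int) : Prop := N ≤ (A.length : Int)
instance (A : List Int) (N : Int) : Decidable (Pre_StrictlyPositiveXor A N) := by
  unfold Pre_StrictlyPositiveXor; infer_instance

def pvWitness_StrictlyPositiveXor : List Int × Int := ([0, 3, 0, 5], 4)

def Spec_StrictlyPositiveXor (A : List Int) (N : Int) (out : Int) : Prop := out = StrictlyPositiveXor_alt A N
instance (A : List Int) (N : Int) (out : Int) : Decidable (Spec_StrictlyPositiveXor A N out) := by unfold Spec_StrictlyPositiveXor; infer_instance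

-- ===== CLAIM (what is proved, stated in full; the proofs are below) =====
def Claim_equal_StrictlyPositiveXor : Prop := ∀ (A : List Int) (N : Int), Dom_StrictlyPositiveXor A N → Pre_StrictlyPositiveXor A N → Spec_StrictlyPositiveXor A N (StrictlyPositiveXor A N)

-- ===== LEMMAS AND PROOFS =====

-- the predicate both programs test
def pxPos (A : List Int) (i : Int) : Bool := PySem.List.pyGetD A i 0 > 0

-- B's fold, first component
theorem foldB_fst (A : List Int) (N : Int) (L : List Int) (s : Int × Int) :
    (L.foldl (pxStepB A N) s).1 = L.foldl (fun x i => Int.xor x (PySem.List.pyGetD A i 0)) s.1 := by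
  induction L generalizing s with
  | nil => rfl
  | cons i rest ih =>
    simp only [List.foldl_cons]
    rw [ih]
    unfold pxStepB
    by_cases h : PySem.List.pyGetD A i 0 > 0 <;> simp [h]

-- B's fold, second component: a running max over the positive positions
theorem foldB_snd (A : List Int) (N : Int) (L : List Int) (s : Int × Int) :
    (L.foldl (pxStepB A N) s).2 =
      (L.filter (pxPos A)).foldl (fun b i => max b (max i (N - i - 1))) s.2 := by
  induction L generalizing s with
  | nil => rfl
  | cons i rest ih =>
    rw [List.foldl_cons, ih]
    unfold pxStepB pxPos
    by_cases h : PySem.List.pyGetD A i 0 > 0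
    · simp only [h, decide_true, List.filter_cons, if_true, List.foldl_cons]
      congr 1
      simp only [max_def]
      split_ifs <;> omega
    · simp [h]

-- the running max over a strictly increasing nonempty list of positions
theorem foldMax (N b f : Int) (rest : List Int)
    (h : (f :: rest).Pairwise (· < ·)) :
    (f :: rest).foldl (fun b i => max b (max i (N - i - 1))) b
      = max b (max (rest.getLastD f) (N - f - 1)) := by
  induction rest generalizing b f with
  | nil => simp
  | cons g rs ih =>
    have hfg : f < g := (List.pairwise_cons.mp h).1 g (by simp)
    have htail : (g :: rs).Pairwise (· < ·) := (List.pairwise_cons.mp h).2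
    have hgl : g ≤ rs.getLastD g := by
      rcases List.mem_cons.mp (List.getLastD_mem_cons (l := rs) (a := g)) with he | hm'
      · omega
      · exact le_of_lt ((List.pairwise_cons.mp htail).1 _ hm')
    rw [List.foldl_cons, ih _ g htail, List.getLastD_cons]
    simp only [max_def]
    split_ifs <;> omega

-- A's first loop, component-wise
theorem foldA_fst (A : List Int) (L : List Int) (s : Int × Bool) :
    (L.foldl (pxLoop1 A) s).1 = L.foldl (fun x i => Int.xor x (PySem.List.pyGetD A i 0)) s.1 := by
  induction L generalizing s with
  | nil => rfl
  | cons i rest ih =>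
    simp only [List.foldl_cons]
    rw [ih]
    unfold pxLoop1
    by_cases h : PySem.List.pyGetD A i 0 > 0 <;> simp

theorem foldA_snd (A : List Int) (L : List Int) (s : Int × Bool) :
    (L.foldl (pxLoop1 A) s).2 = (s.2 && !(L.any (pxPos A))) := by
  induction L generalizing s with
  | nil => simp
  | cons i rest ih =>
    simp only [List.foldl_cons, List.any_cons]
    rw [ih]
    unfold pxLoop1 pxPos
    by_cases h : PySem.List.pyGetD A i 0 > 0 <;> simp [h]

-- A's break-scans in terms of find?
theorem pxScan_eq (A : List Int) (L : List Int) (d : Int) :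
    pxScan A L d = ((L.find? (pxPos A)).map (· + 1)).getD d := by
  induction L with
  | nil => rfl
  | cons i rest ih =>
    rw [pxScan, ih]
    by_cases h : PySem.List.pyGetD A i 0 > 0
    · rw [List.find?_cons_of_pos (by simpa [pxPos] using h), if_pos h]; rfl
    · rw [List.find?_cons_of_neg (by simpa [pxPos] using h), if_neg h]

-- find? = head of filter
theorem find?_eq_head?_filter {α : Type} (p : α → Bool) (L : List α) :
    L.find? p = (L.filter p).head? := by
  induction L with
  | nil => rfl
  | cons x rest ih =>
    by_cases h : p x
    · rw [List.find?_cons_of_pos h, List.filter_cons, if_pos h, List.head?_cons]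
    · rw [List.find?_cons_of_neg (by simp [h]), List.filter_cons, if_neg h, ih]

theorem StrictlyPositiveXor_eq_alt (A : List Int) (N : Int) :
    StrictlyPositiveXor A N = StrictlyPositiveXor_alt A N := by
  unfold StrictlyPositiveXor StrictlyPositiveXor_alt
  have hrev0 : PySem.List.pyRange (N - 1) (-1) (-1) = (PySem.List.pyRange 0 N 1).reverse := by
    rw [PySem.List.pyRange_neg_one_eq_reverse]; norm_num
  rw [foldA_fst, foldB_fst, foldA_snd, foldB_snd, pxScan_eq, hrev0, pxScan_eq]
  generalize hL : PySem.List.pyRange 0 N 1 = L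
  have hpair : (L.filter (pxPos A)).Pairwise (· < ·) :=
    List.Pairwise.sublist List.filter_sublist (hL ▸ PySem.List.pairwise_lt_pyRange_one 0 N)
  have hnonneg : ∀ x ∈ L.filter (pxPos A), 0 ≤ x ∧ x < N := by
    intro x hx
    have : x ∈ L := List.mem_of_mem_filter hx
    have := (PySem.List.mem_pyRange_one).mp (hL ▸ this)
    omega
  by_cases hx : L.foldl (fun x i => Int.xor x (PySem.List.pyGetD A i 0)) 0 ≠ 0
  · simp [hx]
  · simp only [hx]
    rw [find?_eq_head?_filter, find?_eq_head?_filter, List.filter_reverse,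
        List.head?_reverse]
    cases hP : L.filter (pxPos A) with
    | nil =>
      have hany : L.any (pxPos A) = false := by
        rw [List.any_eq_false]
        intro x hxm hpx
        have : x ∈ L.filter (pxPos A) := List.mem_filter.mpr ⟨hxm, hpx⟩
        simp [hP] at this
      simp [hany]
    | cons f rest =>
      have hany : L.any (pxPos A) = true := by
        rw [List.any_eq_true]
        have hf : f ∈ L.filter (pxPos A) := by simp [hP]
        exact ⟨f, List.mem_of_mem_filter hf, (List.mem_filter.mp hf).2⟩
      rw [hP] at hpair hnonneg
      rw [foldMax N (-1) f rest hpair]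
      have hgl := hnonneg _ (List.getLastD_mem_cons (l := rest) (a := f))
      have hfb := hnonneg f (by simp)
      have hfl : f ≤ rest.getLastD f := by
        rcases List.mem_cons.mp (List.getLastD_mem_cons (l := rest) (a := f)) with he | hm'
        · omega
        · exact le_of_lt ((List.pairwise_cons.mp hpair).1 _ hm')
      rw [List.getLast?_cons]
      simp only [hany, Bool.true_and, Bool.not_true, Bool.false_eq_true, if_false,
        List.head?_cons, Option.map_some, Option.getD_some]
      simp only [max_def, ← List.getLastD_eq_getLast?]
      split_ifs <;> omega

-- ===== VERDICT (by name: the statement is the Claim_ definition above) =====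
theorem StrictlyPositiveXor_spec : Claim_equal_StrictlyPositiveXor := by
  intro A N _ _
  unfold Spec_StrictlyPositiveXor
  exact StrictlyPositiveXor_eq_alt A N
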